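-- pv_equiv track=rewrite | github.com/AibekMinbaev/algorithms | cf/contests/2070/b.py | solve
-- ===== SOURCE A (Python) =====
-- def solve(n, x, k, s):
--     time = 0
--     for dir in s:
--         if dir == "L":
--             x -= 1
--         else:
--             x += 1
--         time += 1
--
--         if x == 0:
--             break
--     else:
--         return 0
--
--     if k < time:
--         return 0
--
--     k -= time
--
--     time = 0
--     for dir in s:
--         if dir == "L":
--             x -= 1
--         else:
--             x += 1
--         time += 1
--
--         if x == 0:
--             break
--     else:
--         return 1
--
--     return k // time + 1
-- ===== SOURCE B (Python) =====
-- def solve(n, x, k, s):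
--     # One pass builds first_occ: cumulative displacement -> first 1-based step index.
--     first_occ = {}
--     p = 0
--     i = 0
--     for c in s:
--         p += -1 if c == "L" else 1
--         i += 1
--         if p not in first_occ:
--             first_occ[p] = i
--     t1 = first_occ.get(-x)
--     if t1 is None or k < t1:
--         return 0
--     t2 = first_occ.get(0)
--     if t2 is None:
--         return 1
--     return (k - t1) // t2 + 1
-- ===== Notes on version B (the rewrite author's own statement) =====
-- stated objective: alternative
-- what changed: Replaces A's two sequential break-loops over s by a single pass that indexes each cumulative displacement's first occurrence in a dict, then answers both phases by lookups first_occ.get(-x) and first_occ.get(0).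
import Mathlib
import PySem

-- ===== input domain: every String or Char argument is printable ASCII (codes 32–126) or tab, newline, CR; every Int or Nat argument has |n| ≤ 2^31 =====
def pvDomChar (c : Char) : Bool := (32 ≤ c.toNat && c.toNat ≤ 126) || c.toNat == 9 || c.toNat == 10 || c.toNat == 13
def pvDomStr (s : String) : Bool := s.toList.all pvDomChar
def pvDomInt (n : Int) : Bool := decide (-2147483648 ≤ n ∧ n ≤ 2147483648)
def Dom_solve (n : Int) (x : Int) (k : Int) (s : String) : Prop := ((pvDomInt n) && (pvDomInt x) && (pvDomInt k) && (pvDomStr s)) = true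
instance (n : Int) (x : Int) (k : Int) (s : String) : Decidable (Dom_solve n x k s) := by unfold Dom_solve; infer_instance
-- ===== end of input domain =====

-- B replaces A's two sequential break-loops by one indexing pass plus two dict lookups (alternative decomposition, same cost).

-- ===== PORT A =====
-- A's for-loop with break/else: returns some time at the break (x hit 0 after a step), none on normal exit.
def solveLoop (cs : List Char) (x : Int) (time : Int) : Option Int :=
  match cs with
  | [] => none
  | c :: rest =>
    let x' := if c = 'L' then x - 1 else x + 1
    let time' := time + 1
    if x' = 0 then some time' else solveLoop rest x' time'

def solve (n : Int) (x : Int) (k : Int) (s : String) : Int :=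
  match solveLoop s.toList x 0 with
  | none => 0
  | some time =>
    if k < time then 0
    else
      let k' := k - time
      match solveLoop s.toList 0 0 with
      | none => 1
      | some time2 => PySem.Int.floordiv k' time2 + 1

-- ===== PORT B =====
-- Source B's single indexing pass: dict of first occurrence of each cumulative displacement (1-based step index).
def buildOcc (cs : List Char) (d : PySem.Dict Int Int) (p : Int) (i : Int) : PySem.Dict Int Int :=
  match cs with
  | [] => d
  | c :: rest =>
    let p' := p + (if c = 'L' then -1 else 1)
    let i' := i + 1
    let d' := if d.contains p' then d else d.insert p' i'
    buildOcc rest d' p' i'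

def solve_alt (n : Int) (x : Int) (k : Int) (s : String) : Int :=
  let firstOcc := buildOcc s.toList PySem.Dict.empty 0 0
  match firstOcc.get? (-x) with
  | none => 0
  | some t1 =>
    if k < t1 then 0
    else
      match firstOcc.get? 0 with
      | none => 1
      | some t2 => PySem.Int.floordiv (k - t1) t2 + 1

-- ===== PRECONDITION & SPEC =====
def Spec_solve (n : Int) (x : Int) (k : Int) (s : String) (out : Int) : Prop := out = solve_alt n x k s
instance (n : Int) (x : Int) (k : Int) (s : String) (out : Int) : Decidable (Spec_solve n x k s out) := by unfold Spec_solve; infer_instance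

-- ===== CLAIM (what is proved, stated in full; the proofs are below) =====
def Claim_equal_solve : Prop := ∀ (n : Int) (x : Int) (k : Int) (s : String), Dom_solve n x k s → Spec_solve n x k s (solve n x k s)

-- ===== LEMMAS AND PROOFS =====

-- common characterisation: first 1-based index (offset i) at which the running displacement (from p) equals q
def firstHit (cs : List Char) (p : Int) (i : Int) (q : Int) : Option Int :=
  match cs with
  | [] => none
  | c :: rest =>
    let p' := p + (if c = 'L' then -1 else 1)
    if p' = q then some (i + 1) else firstHit rest p' (i + 1) q

theorem solveLoop_eq_firstHit (cs : List Char) (x p t : Int) :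
    solveLoop cs x t = firstHit cs p t (p - x) := by
  induction cs generalizing x p t with
  | nil => rfl
  | cons c rest ih =>
    simp only [solveLoop, firstHit]
    have hx : (if c = 'L' then x - 1 else x + 1) = x + (if c = 'L' then -1 else 1) := by
      split_ifs <;> ring
    rw [hx]
    by_cases h : x + (if c = 'L' then -1 else 1) = 0
    · rw [if_pos h, if_pos (by omega : p + (if c = 'L' then -1 else 1) = p - x)]
    · rw [if_neg h, if_neg (by omega : ¬ p + (if c = 'L' then -1 else 1) = p - x),
        ih (x + (if c = 'L' then -1 else 1)) (p + (if c = 'L' then -1 else 1)) (t + 1)]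
      congr 1
      omega

theorem buildOcc_get? (cs : List Char) (d : PySem.Dict Int Int) (p i q : Int) :
    (buildOcc cs d p i).get? q = (d.get? q).orElse (fun _ => firstHit cs p i q) := by
  induction cs generalizing d p i with
  | nil => cases h : d.get? q <;> simp [buildOcc, firstHit, Option.orElse, h]
  | cons c rest ih =>
    simp only [buildOcc, firstHit]
    set p' := p + (if c = 'L' then -1 else 1) with hp'
    by_cases hq : p' = q
    · subst hq
      by_cases hc : d.contains p'
      · have hs : ∃ v, d.get? p' = some v := by
          rcases h : d.get? p' with _ | v
          · rw [PySem.Dict.get?_eq_none_iff_contains] at h; simp [h] at hc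
          · exact ⟨v, rfl⟩
        rcases hs with ⟨v, hv⟩
        rw [if_pos hc, ih, hv]
        simp [Option.orElse]
      · have hn : d.get? p' = none := by
          rw [PySem.Dict.get?_eq_none_iff_contains]; simpa using hc
        rw [if_neg hc, ih, PySem.Dict.get?_insert_self, hn]
        simp [Option.orElse]
    · have hkey : (if d.contains p' then d else d.insert p' (i+1)).get? q = d.get? q := by
        split_ifs
        · rfl
        · rw [PySem.Dict.get?_insert]
          exact if_neg (fun h => hq h.symm)
      rw [ih, hkey, if_neg hq]

-- ===== VERDICT (by name: the statement is the Claim_ definition above) =====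
theorem solve_spec : Claim_equal_solve := by
  intro n x k s _
  unfold Spec_solve solve solve_alt
  have h1 : solveLoop s.toList x 0 = firstHit s.toList 0 0 (-x) := by
    have := solveLoop_eq_firstHit s.toList x 0 0
    simpa using this
  have h2 : solveLoop s.toList 0 0 = firstHit s.toList 0 0 0 := by
    have := solveLoop_eq_firstHit s.toList 0 0 0
    simpa using this
  have hb : ∀ q, (buildOcc s.toList PySem.Dict.empty 0 0).get? q = firstHit s.toList 0 0 q := by
    intro q
    rw [buildOcc_get?]
    simp [Option.orElse]
  simp only [h1, h2, hb]
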